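-- pv_equiv track=rewrite | github.com/heijp06/AoC-2022 | day16/lib.py | get_max_pressure_left
-- ===== SOURCE A (Python) =====
-- MINUTES = 30
--
-- def get_max_pressure_left(rates: list[int]):
--     down = sorted(rates)
--     pressure_left: list[int] = [0]
--     pressure = 0
--     for _ in range(0, MINUTES, 2):
--         if down:
--             pressure += down.pop()
--         pressure_left.insert(0, pressure_left[0] + pressure)
--         pressure_left.insert(0, pressure_left[0] + pressure)
--     pressure_left.pop()
--     return pressure_left
-- ===== SOURCE B (Python) =====
-- def get_max_pressure_left(rates: list[int]):
--     down = sorted(rates, reverse=True)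
--     pressure = 0
--     inc: list[int] = []
--     for i in range(15):
--         if i < len(down):
--             pressure += down[i]
--         inc.append(pressure)
--         inc.append(pressure)
--     result: list[int] = []
--     total = 0
--     for x in inc:
--         total += x
--         result.append(total)
--     result.reverse()
--     return result
-- ===== Notes on version B (the rewrite author's own statement) =====
-- stated objective: simpler
-- what changed: Replaces A's repeated front-insert on a growing list plus sentinel pop and back-pops from the ascending sort with a descending sort and two plain forward passes (doubled increments, then a running cumulative sum) followed by one reverse.
import Mathlib
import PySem

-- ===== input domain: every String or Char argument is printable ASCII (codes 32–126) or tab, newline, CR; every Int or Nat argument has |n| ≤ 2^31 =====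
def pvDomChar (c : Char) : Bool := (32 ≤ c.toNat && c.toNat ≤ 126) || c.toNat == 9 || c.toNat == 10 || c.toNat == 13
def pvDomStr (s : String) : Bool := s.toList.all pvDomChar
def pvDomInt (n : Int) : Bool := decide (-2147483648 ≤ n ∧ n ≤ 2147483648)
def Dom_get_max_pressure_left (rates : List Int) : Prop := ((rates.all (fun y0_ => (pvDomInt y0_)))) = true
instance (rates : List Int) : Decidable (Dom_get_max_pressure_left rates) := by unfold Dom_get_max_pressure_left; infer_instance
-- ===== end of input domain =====

-- B replaces A's front-insert/sentinel-pop construction with two plain forward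
-- passes (doubled increments, then a running cumulative sum) plus one reverse
-- (objective: simpler).

-- ===== PORT A =====
-- one iteration of A's loop body: optional pop from the end of `down`,
-- then two front-inserts of pressure_left[0] + pressure
def pvStepA (s : List Int × Int × List Int) : List Int × Int × List Int :=
  let down := s.1
  let pressure := s.2.1
  let pl := s.2.2
  let dp : List Int × Int :=
    match down.getLast? with
    | some v => (down.dropLast, pressure + v)   -- down.pop()
    | none => (down, pressure)                  -- `if down:` false
  let pl := (pl.headD 0 + dp.2) :: pl           -- insert(0, pl[0] + pressure); pl is never empty
  let pl := (pl.headD 0 + dp.2) :: pl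
  (dp.1, dp.2, pl)

-- `for _ in range(0, MINUTES, 2)` = 15 iterations
def pvLoopA : Nat → List Int × Int × List Int → List Int × Int × List Int
  | 0, s => s
  | n + 1, s => pvLoopA n (pvStepA s)

def get_max_pressure_left (rates : List Int) : List Int :=
  let down := PySem.List.sorted rates (fun x => x)
  let st := pvLoopA 15 (down, 0, [0])
  st.2.2.dropLast                               -- pressure_left.pop()

-- ===== PORT B =====
-- the `inc` list: walk the descending rates for 15 steps (staying flat once
-- exhausted), appending the running pressure twice per step
def pvInc : Nat → List Int → Int → List Int
  | 0, _, _ => []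
  | n + 1, [], p => p :: p :: pvInc n [] p
  | n + 1, d :: rest, p => (p + d) :: (p + d) :: pvInc n rest (p + d)

-- second pass: running cumulative sum
def pvCumsum : Int → List Int → List Int
  | _, [] => []
  | t, x :: xs => (t + x) :: pvCumsum (t + x) xs

def get_max_pressure_left_alt (rates : List Int) : List Int :=
  let down := PySem.List.sorted rates (fun x => x) true
  (pvCumsum 0 (pvInc 15 down 0)).reverse

-- ===== PRECONDITION & SPEC =====
def Spec_get_max_pressure_left (rates : List Int) (out : List Int) : Prop := out = get_max_pressure_left_alt rates
instance (rates : List Int) (out : List Int) : Decidable (Spec_get_max_pressure_left rates out) := by unfold Spec_get_max_pressure_left; infer_instance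

-- ===== CLAIM (what is proved, stated in full; the proofs are below) =====
def Claim_equal_get_max_pressure_left : Prop := ∀ (rates : List Int), Dom_get_max_pressure_left rates → Spec_get_max_pressure_left rates (get_max_pressure_left rates)

-- ===== LEMMAS AND PROOFS =====

-- On Int (no key, so ties are identical values) the stable descending sort is
-- exactly the reverse of the ascending sort.
theorem pv_sorted_rev_eq_reverse (xs : List Int) :
    PySem.List.sorted xs (fun x => x) true = (PySem.List.sorted xs (fun x => x)).reverse := by
  have hp : (PySem.List.sorted xs (fun x => x) true).Perm
      (PySem.List.sorted xs (fun x => x)).reverse :=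
    (PySem.List.sorted_perm xs (fun x => x) true).trans
      ((PySem.List.sorted_perm xs (fun x => x) false).symm.trans
        (List.reverse_perm _).symm)
  exact hp.eq_of_pairwise (fun a b _ _ h1 h2 => le_antisymm h2 h1)
    (PySem.List.sorted_pairwise_rev xs (fun x => x))
    ((List.pairwise_reverse).2 (PySem.List.sorted_pairwise xs (fun x => x)))

-- Main invariant: running A's loop on the REVERSED descending list `ds`
-- produces, in front of the old `pressure_left`, the reverse of B's cumulative
-- sums of the increments, started from the current head.
theorem pv_loop_eq (n : Nat) (ds : List Int) (p : Int) (pl : List Int) :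
    (pvLoopA n (ds.reverse, p, pl)).2.2
      = (pvCumsum (pl.headD 0) (pvInc n ds p)).reverse ++ pl := by
  induction n generalizing ds p pl with
  | zero => simp [pvLoopA, pvInc, pvCumsum]
  | succ n ih =>
    cases ds with
    | nil =>
      have h := ih ([] : List Int) p ((pl.headD 0 + p + p) :: (pl.headD 0 + p) :: pl)
      simp [pvLoopA, pvStepA, pvInc, pvCumsum] at h ⊢
      rw [h]
    | cons d rest =>
      have h := ih rest (p + d)
        ((pl.headD 0 + (p + d) + (p + d)) :: (pl.headD 0 + (p + d)) :: pl)
      simp [pvLoopA, pvStepA, pvInc, pvCumsum] at h ⊢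
      rw [h]

-- ===== VERDICT (by name: the statement is the Claim_ definition above) =====
theorem get_max_pressure_left_spec : Claim_equal_get_max_pressure_left := by
  intro rates _
  unfold Spec_get_max_pressure_left get_max_pressure_left get_max_pressure_left_alt
  show (pvLoopA 15 (PySem.List.sorted rates (fun x => x), 0, [0])).2.2.dropLast
      = (pvCumsum 0 (pvInc 15 (PySem.List.sorted rates (fun x => x) true) 0)).reverse
  have hs : PySem.List.sorted rates (fun x => x) false
      = (PySem.List.sorted rates (fun x => x) true).reverse := by
    rw [pv_sorted_rev_eq_reverse]; simp
  rw [hs, pv_loop_eq 15 (PySem.List.sorted rates (fun x => x) true) 0 [0]]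
  simp
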